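-- pv_equiv track=rewrite | github.com/wiggs199/Codewars-Kata-8-Challenges | The_Hashtag_Generator.py | generate_hashtag
-- ===== SOURCE A (Python) =====
-- def generate_hashtag(s):
--     #your code here
--
--     hash = '#'
--     group = s.split()
--     new = [x.capitalize() for x in group]
--     listToStr = ''.join(map(str,new))
--
--     if listToStr == '' or len(s) > 140 :
--         return False
--     else:
--         return hash + listToStr
-- ===== SOURCE B (Python) =====
-- def generate_hashtag(s):
--     if len(s) > 140:
--         return False
--     buf = ['#']
--     new_word = True
--     for ch in s:
--         if ch.isspace():
--             new_word = True
--         else: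
--             buf.append(ch.upper() if new_word else ch.lower())
--             new_word = False
--     if len(buf) == 1:
--         return False
--     return ''.join(buf)
-- ===== Notes on version B (the rewrite author's own statement) =====
-- stated objective: alternative
-- what changed: Replaces split/capitalize-each-word/join with a single left-to-right scan that maintains a word-start flag and emits each character uppercased at a word start and lowercased otherwise.
-- outside the precondition, e.g. on generate_hashtag(''): A returns False, B returns False; on generate_hashtag('   '): A returns False, B returns False
import Mathlib
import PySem

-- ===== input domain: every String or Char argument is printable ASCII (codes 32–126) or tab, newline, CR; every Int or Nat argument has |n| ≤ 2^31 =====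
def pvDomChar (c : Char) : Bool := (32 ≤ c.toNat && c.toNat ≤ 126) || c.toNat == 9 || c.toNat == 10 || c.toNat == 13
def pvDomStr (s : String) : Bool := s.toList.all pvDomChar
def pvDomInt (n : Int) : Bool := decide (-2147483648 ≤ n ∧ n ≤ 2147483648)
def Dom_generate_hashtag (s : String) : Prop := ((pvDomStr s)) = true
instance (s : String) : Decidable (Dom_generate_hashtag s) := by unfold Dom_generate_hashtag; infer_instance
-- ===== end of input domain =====

-- B builds the hashtag in a single scan with a word-start flag instead of A's split/capitalize/join; equivalence is about the returned string (A/B return Python False — not a string — outside Pre_).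

-- ===== PORT A =====
-- str.capitalize() on the ASCII domain: first char uppercased, rest lowercased
def pyCapitalize (w : List Char) : List Char :=
  match w with
  | [] => []
  | c :: rest => PySem.Chars.upperChar c :: PySem.Chars.lower rest

def generate_hashtag (s : String) : String :=
  let group := PySem.Chars.split₀ s.toList
  let new := group.map pyCapitalize
  let listToStr := PySem.Chars.join [] new
  if listToStr = [] ∨ 140 < PySem.Str.len s then ""  -- Python returns False here (not a string); excluded by Pre_
  else String.ofList ('#' :: listToStr)

-- ===== PORT B =====
def ghStep (st : List Char × Bool) (ch : Char) : List Char × Bool :=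
  if PySem.Chars.isspace ch then (st.1, true)
  else (st.1 ++ [if st.2 then PySem.Chars.upperChar ch else PySem.Chars.lowerChar ch], false)

def generate_hashtag_alt (s : String) : String :=
  if 140 < PySem.Str.len s then ""  -- Python B returns False here (not a string); excluded by Pre_
  else
    let st := s.toList.foldl ghStep (['#'], true)
    if st.1.length = 1 then "" else String.ofList st.1

-- ===== PRECONDITION & SPEC =====
-- Pre_ excludes exactly the inputs (no non-whitespace character, or len(s) > 140) on which Python A
-- returns False, which is not a value of the declared String return type (B returns False there too).
def Pre_generate_hashtag (s : String) : Prop :=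
  s.toList.any (fun c => !PySem.Chars.isspace c) = true ∧ PySem.Str.len s ≤ 140
instance (s : String) : Decidable (Pre_generate_hashtag s) := by
  unfold Pre_generate_hashtag; infer_instance

def pvWitness_generate_hashtag : String := "hello world"

def Spec_generate_hashtag (s : String) (out : String) : Prop := out = generate_hashtag_alt s
instance (s : String) (out : String) : Decidable (Spec_generate_hashtag s out) := by
  unfold Spec_generate_hashtag; infer_instance

-- ===== CLAIM (what is proved, stated in full; the proofs are below) =====
def Claim_equal_generate_hashtag : Prop :=
  ∀ (s : String), Dom_generate_hashtag s → Pre_generate_hashtag s →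
    Spec_generate_hashtag s (generate_hashtag s)

-- ===== LEMMAS AND PROOFS =====

-- common characterization: the word characters emitted left to right, `nw` = "at a word start"
def wordsCap : List Char → Bool → List Char
  | [], _ => []
  | c :: rest, nw =>
      if PySem.Chars.isspace c then wordsCap rest true
      else (if nw then PySem.Chars.upperChar c else PySem.Chars.lowerChar c) :: wordsCap rest false

theorem foldl_ghStep (cs : List Char) (buf : List Char) (nw : Bool) :
    (cs.foldl ghStep (buf, nw)).1 = buf ++ wordsCap cs nw := by
  induction cs generalizing buf nw with
  | nil => simp [wordsCap]
  | cons c rest ih =>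
      by_cases h : PySem.Chars.isspace c = true
      · simp [ghStep, wordsCap, h, ih]
      · simp [ghStep, wordsCap, h, ih]

theorem cap_append_singleton (w : List Char) (c : Char) (h : w ≠ []) :
    pyCapitalize (w ++ [c]) = pyCapitalize w ++ [PySem.Chars.lowerChar c] := by
  cases w with
  | nil => exact absurd rfl h
  | cons a t => simp [pyCapitalize, PySem.Chars.lower]

theorem join_nil_eq_flatten (xs : List (List Char)) :
    PySem.Chars.join [] xs = xs.flatten := by
  simp [PySem.Chars.join, List.intercalate]
  induction xs with
  | nil => simp
  | cons a t ih => cases t <;> simp_all [List.intersperse]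

theorem go_flatten_cap (cs cur : List Char) (acc : List (List Char)) :
    ((PySem.Chars.split₀.go cs cur acc).map pyCapitalize).flatten =
      (acc.reverse.map pyCapitalize).flatten ++
        (if cur = [] then wordsCap cs true
         else pyCapitalize cur.reverse ++ wordsCap cs false) := by
  induction cs generalizing cur acc with
  | nil =>
      by_cases h : cur = []
      · simp [PySem.Chars.split₀.go, h, wordsCap]
      · simp [PySem.Chars.split₀.go, h, List.isEmpty_iff, wordsCap]
  | cons c rest ih =>
      by_cases hsp : PySem.Chars.isspace c = true
      · by_cases h : cur = []
        · simp [PySem.Chars.split₀.go, hsp, h, ih, wordsCap]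
        · simp only [PySem.Chars.split₀.go, hsp, if_true, List.isEmpty_iff, h, if_false]
          rw [ih]
          simp [wordsCap, hsp]
      · by_cases h : cur = []
        · subst h
          simp only [PySem.Chars.split₀.go, hsp, Bool.false_eq_true, if_false]
          rw [ih]
          simp [wordsCap, hsp, pyCapitalize, PySem.Chars.lower]
        · simp only [PySem.Chars.split₀.go, hsp, Bool.false_eq_true, if_false]
          rw [ih]
          have hc : (c :: cur).reverse = cur.reverse ++ [c] := by simp
          simp [hc, cap_append_singleton cur.reverse c (by simpa using h), wordsCap, hsp, h]

theorem split₀_flatten_cap (cs : List Char) :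
    ((PySem.Chars.split₀ cs).map pyCapitalize).flatten = wordsCap cs true := by
  have := go_flatten_cap cs [] []
  simpa [PySem.Chars.split₀] using this

theorem wordsCap_eq_nil_iff (cs : List Char) (nw : Bool) :
    wordsCap cs nw = [] ↔ cs.all PySem.Chars.isspace = true := by
  induction cs generalizing nw with
  | nil => simp [wordsCap]
  | cons c rest ih =>
      by_cases h : PySem.Chars.isspace c = true
      · simp [wordsCap, h, ih]
      · simp [wordsCap, h]

-- ===== VERDICT (by name: the statement is the Claim_ definition above) =====
theorem generate_hashtag_spec : Claim_equal_generate_hashtag := by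
  intro s _ hpre
  obtain ⟨h1, h2⟩ := hpre
  unfold Spec_generate_hashtag generate_hashtag generate_hashtag_alt
  have hlen : ¬ (140 < PySem.Str.len s) := by omega
  have hne : wordsCap s.toList true ≠ [] := by
    intro h
    rw [wordsCap_eq_nil_iff] at h
    simp only [List.any_eq_true, List.all_eq_true, Bool.not_eq_true'] at h1 h
    obtain ⟨c, hc, hcs⟩ := h1
    simp [h c hc] at hcs
  have hA : PySem.Chars.join [] ((PySem.Chars.split₀ s.toList).map pyCapitalize) =
      wordsCap s.toList true := by
    rw [join_nil_eq_flatten, split₀_flatten_cap]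
  have hB : (s.toList.foldl ghStep (['#'], true)).1 = '#' :: wordsCap s.toList true := by
    simpa using foldl_ghStep s.toList ['#'] true
  have h2' : s.length ≤ 140 := by
    have e1 := PySem.Str.len_eq s
    have e2 : s.toList.length = s.length := String.length_toList
    omega
  simp only [hA, hB, if_neg (by simp [hne, h2'] : ¬ (wordsCap s.toList true = [] ∨ 140 < PySem.Str.len s)), if_neg hlen]
  simp [hne]
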